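-- pv_equiv track=rewrite | github.com/venkatakumar/Playwright_Link | Linkedin SC/linkedin_people_search_scraper.py | categorize_title
-- ===== SOURCE A (Python) =====
-- def categorize_title(title):
--     """Categorize job titles"""
--     if not title:
--         return "Unknown"
--
--     title_lower = title.lower()
--
--     if any(word in title_lower for word in ['ceo', 'chief executive', 'founder', 'co-founder']):
--         return "CEO/Founder"
--     elif any(word in title_lower for word in ['cto', 'chief technology', 'chief technical']):
--         return "CTO"
--     elif any(word in title_lower for word in ['cfo', 'chief financial']):
--         return "CFO"
--     elif any(word in title_lower for word in ['coo', 'chief operating']):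
--         return "COO"
--     elif any(word in title_lower for word in ['vp', 'vice president', 'director']):
--         return "VP/Director"
--     elif any(word in title_lower for word in ['president', 'managing director']):
--         return "President/MD"
--     else:
--         return "Other Executive"
-- ===== SOURCE B (Python) =====
-- # Single left-to-right scan over the lowered title: at each position, test which
-- # keywords start there and keep the minimum (highest-priority) category index.
-- _KEYWORDS = [
--     ('ceo', 0), ('chief executive', 0), ('founder', 0), ('co-founder', 0),
--     ('cto', 1), ('chief technology', 1), ('chief technical', 1),
--     ('cfo', 2), ('chief financial', 2),
--     ('coo', 3), ('chief operating', 3),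
--     ('vp', 4), ('vice president', 4), ('director', 4),
--     ('president', 5), ('managing director', 5),
-- ]
--
-- _LABELS = ["CEO/Founder", "CTO", "CFO", "COO", "VP/Director",
--            "President/MD", "Other Executive"]
--
-- def categorize_title(title):
--     """Categorize job titles"""
--     if not title:
--         return "Unknown"
--     t = title.lower()
--     best = 6
--     for i in range(len(t)):
--         for kw, cat in _KEYWORDS:
--             if cat < best and t.startswith(kw, i):
--                 best = cat
--     return _LABELS[best]
-- ===== Notes on version B (the rewrite author's own statement) =====
-- stated objective: alternative
-- what changed: Instead of testing each keyword group for containment in branch order, B makes a single left-to-right scan over the lowered title, testing at each position which keywords start there and keeping the minimum (highest-priority) category index, then maps that index to its label.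
import Mathlib
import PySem

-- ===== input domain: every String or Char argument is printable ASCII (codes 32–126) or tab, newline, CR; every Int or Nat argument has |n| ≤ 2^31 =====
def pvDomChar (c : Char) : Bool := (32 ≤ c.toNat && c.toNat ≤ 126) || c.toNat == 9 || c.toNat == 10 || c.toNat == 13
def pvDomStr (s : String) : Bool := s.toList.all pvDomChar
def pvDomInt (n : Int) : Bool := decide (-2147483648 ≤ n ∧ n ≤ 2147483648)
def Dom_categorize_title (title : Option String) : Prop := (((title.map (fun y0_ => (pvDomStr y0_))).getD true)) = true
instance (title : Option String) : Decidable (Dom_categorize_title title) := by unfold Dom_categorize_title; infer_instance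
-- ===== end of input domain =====

-- B replaces A's six-way keyword cascade by a single left-to-right scan over the title,
-- keeping the minimum (highest-priority) category index of any keyword starting at each
-- position (alternative decomposition; same cost).

-- ===== PORT A =====
def categorize_title (title : Option String) : String :=
  match title with
  | none => "Unknown"
  | some t =>
    if t = "" then "Unknown"
    else
      let title_lower := PySem.Str.lower t
      if ["ceo", "chief executive", "founder", "co-founder"].any (fun w => PySem.Str.isIn w title_lower) then "CEO/Founder"
      else if ["cto", "chief technology", "chief technical"].any (fun w => PySem.Str.isIn w title_lower) then "CTO"
      else if ["cfo", "chief financial"].any (fun w => PySem.Str.isIn w title_lower) then "CFO"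
      else if ["coo", "chief operating"].any (fun w => PySem.Str.isIn w title_lower) then "COO"
      else if ["vp", "vice president", "director"].any (fun w => PySem.Str.isIn w title_lower) then "VP/Director"
      else if ["president", "managing director"].any (fun w => PySem.Str.isIn w title_lower) then "President/MD"
      else "Other Executive"

-- ===== PORT B =====
-- Source B's _KEYWORDS table: (keyword, category index)
def pvKeywords : List (List Char × Nat) :=
  [("ceo".toList, 0), ("chief executive".toList, 0), ("founder".toList, 0), ("co-founder".toList, 0),
   ("cto".toList, 1), ("chief technology".toList, 1), ("chief technical".toList, 1),
   ("cfo".toList, 2), ("chief financial".toList, 2),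
   ("coo".toList, 3), ("chief operating".toList, 3),
   ("vp".toList, 4), ("vice president".toList, 4), ("director".toList, 4),
   ("president".toList, 5), ("managing director".toList, 5)]

def pvLabels : List String :=
  ["CEO/Founder", "CTO", "CFO", "COO", "VP/Director", "President/MD", "Other Executive"]

-- the inner 'for kw, cat in _KEYWORDS' loop at position i;
-- t.startswith(kw, i) is ported exactly as kw being a prefix of the char list minus its first i chars
def pvKwPass (s : List Char) (i : Nat) (best : Nat) : Nat :=
  pvKeywords.foldl
    (fun best p => if p.2 < best ∧ p.1.isPrefixOf (s.drop i) then p.2 else best) best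

def categorize_title_alt (title : Option String) : String :=
  match title with
  | none => "Unknown"
  | some t =>
    if t = "" then "Unknown"
    else
      let s := (PySem.Str.lower t).toList
      let best := (List.range s.length).foldl (fun best i => pvKwPass s i best) 6
      pvLabels.getD best "Other Executive"   -- _LABELS[best]; best ≤ 6 always, so in range

-- ===== PRECONDITION & SPEC =====
def Spec_categorize_title (title : Option String) (out : String) : Prop := out = categorize_title_alt title
instance (title : Option String) (out : String) : Decidable (Spec_categorize_title title out) := by unfold Spec_categorize_title; infer_instance

-- ===== CLAIM (what is proved, stated in full; the proofs are below) =====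
def Claim_equal_categorize_title : Prop := ∀ (title : Option String), Dom_categorize_title title → Spec_categorize_title title (categorize_title title)

-- ===== LEMMAS AND PROOFS =====

-- the six keyword groups of A, as char lists, in branch order
def pvGroups : List (List (List Char)) :=
  [["ceo".toList, "chief executive".toList, "founder".toList, "co-founder".toList],
   ["cto".toList, "chief technology".toList, "chief technical".toList],
   ["cfo".toList, "chief financial".toList],
   ["coo".toList, "chief operating".toList],
   ["vp".toList, "vice president".toList, "director".toList],
   ["president".toList, "managing director".toList]]

def pvM (s : List Char) (c : Nat) : Bool :=
  (pvGroups.getD c []).any (fun kw => PySem.Chars.isIn kw s)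

def pvBest (s : List Char) : Nat :=
  (List.range s.length).foldl (fun best i => pvKwPass s i best) 6

lemma pvKw_facts : ∀ p ∈ pvKeywords, p.1 ≠ [] ∧ p.2 < 6 := by decide

lemma foldl_kw_le (s : List Char) (i : Nat) (l : List (List Char × Nat)) (b : Nat) :
    l.foldl (fun best p => if p.2 < best ∧ p.1.isPrefixOf (s.drop i) then p.2 else best) b ≤ b := by
  induction l generalizing b with
  | nil => simp
  | cons p l ih =>
    simp only [List.foldl_cons]
    refine le_trans (ih _) ?_
    split <;> omega

lemma inner_le (s : List Char) (i : Nat) (b : Nat) : pvKwPass s i b ≤ b :=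
  foldl_kw_le s i pvKeywords b

lemma inner_le_matched (s : List Char) (i : Nat) (b : Nat) (p : List Char × Nat)
    (hp : p ∈ pvKeywords) (hpre : p.1 <+: s.drop i) : pvKwPass s i b ≤ p.2 := by
  unfold pvKwPass
  generalize hl : pvKeywords = l at hp
  clear hl
  induction l generalizing b with
  | nil => simp at hp
  | cons q l ih =>
    simp only [List.foldl_cons]
    rcases List.mem_cons.mp hp with h | h
    · subst h
      refine le_trans (foldl_kw_le s i l _) ?_
      split <;> rename_i hc
      · omega
      · rw [not_and_or] at hc
        rcases hc with hc | hc
        · omega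
        · exact absurd ((List.isPrefixOf_iff_prefix).mpr hpre) hc
    · exact ih _ h

lemma inner_mem (s : List Char) (i : Nat) (b : Nat) :
    pvKwPass s i b = b ∨ ∃ p ∈ pvKeywords, p.1 <+: s.drop i ∧ pvKwPass s i b = p.2 := by
  unfold pvKwPass
  generalize pvKeywords = l
  induction l generalizing b with
  | nil => simp
  | cons q l ih =>
    simp only [List.foldl_cons]
    rcases ih (if q.2 < b ∧ q.1.isPrefixOf (s.drop i) then q.2 else b) with h | ⟨p, hp, hpre, he⟩
    · rw [h]
      split <;> rename_i hc
      · exact Or.inr ⟨q, List.mem_cons_self .., (List.isPrefixOf_iff_prefix).mp hc.2, rfl⟩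
      · exact Or.inl rfl
    · exact Or.inr ⟨p, List.mem_cons_of_mem _ hp, hpre, he⟩

lemma outer_le (s : List Char) (l : List Nat) (b : Nat) :
    l.foldl (fun best i => pvKwPass s i best) b ≤ b := by
  induction l generalizing b with
  | nil => simp
  | cons i l ih => simpa using le_trans (ih _) (inner_le s i b)

lemma outer_le_matched (s : List Char) (l : List Nat) (b : Nat) (i : Nat) (hi : i ∈ l)
    (p : List Char × Nat) (hp : p ∈ pvKeywords) (hpre : p.1 <+: s.drop i) :
    l.foldl (fun best i => pvKwPass s i best) b ≤ p.2 := by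
  induction l generalizing b with
  | nil => simp at hi
  | cons j l ih =>
    simp only [List.foldl_cons]
    rcases List.mem_cons.mp hi with h | h
    · subst h
      exact le_trans (outer_le s l _) (inner_le_matched s i b p hp hpre)
    · exact ih _ h

lemma outer_inv (s : List Char) (l : List Nat) (b : Nat)
    (P : Nat → Prop) (hb : P b) (hstep : ∀ b i, P b → P (pvKwPass s i b)) :
    P (l.foldl (fun best i => pvKwPass s i best) b) := by
  induction l generalizing b with
  | nil => exact hb
  | cons i l ih =>
    simp only [List.foldl_cons]
    exact ih _ (hstep b i hb)

lemma best_attained (s : List Char) :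
    pvBest s = 6 ∨ ∃ p ∈ pvKeywords, (∃ i, p.1 <+: s.drop i) ∧ pvBest s = p.2 := by
  unfold pvBest
  refine outer_inv s _ 6 (fun v => v = 6 ∨ ∃ p ∈ pvKeywords, (∃ i, p.1 <+: s.drop i) ∧ v = p.2)
    (Or.inl rfl) ?_
  intro b i hb
  rcases inner_mem s i b with h | ⟨p, hp, hpre, he⟩
  · rw [h]; exact hb
  · exact Or.inr ⟨p, hp, ⟨i, hpre⟩, he⟩

lemma exists_lt_of_isIn (s kw : List Char) (hne : kw ≠ [])
    (h : PySem.Chars.isIn kw s = true) : ∃ i < s.length, kw <+: s.drop i := by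
  obtain ⟨i, hi⟩ := (PySem.Chars.exists_prefix_drop_iff_isIn kw s).mpr h
  by_cases hlt : i < s.length
  · exact ⟨i, hlt, hi⟩
  · exfalso
    have hnil : s.drop i = [] := List.drop_eq_nil_of_le (by omega)
    rw [hnil] at hi
    exact hne (List.prefix_nil.mp hi)

lemma best_le_of_isIn (s : List Char) (p : List Char × Nat) (hp : p ∈ pvKeywords)
    (h : PySem.Chars.isIn p.1 s = true) : pvBest s ≤ p.2 := by
  obtain ⟨i, hlt, hpre⟩ := exists_lt_of_isIn s p.1 (pvKw_facts p hp).1 h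
  exact outer_le_matched s _ 6 i (List.mem_range.mpr hlt) p hp hpre

lemma m_iff (s : List Char) (c : Nat) (hc : c < 6) :
    pvM s c = true ↔ ∃ p ∈ pvKeywords, p.2 = c ∧ PySem.Chars.isIn p.1 s = true := by
  interval_cases c <;> simp [pvM, pvGroups, pvKeywords]

lemma best_eq (s : List Char) :
    pvBest s = if pvM s 0 then 0 else if pvM s 1 then 1 else if pvM s 2 then 2
      else if pvM s 3 then 3 else if pvM s 4 then 4 else if pvM s 5 then 5 else 6 := by
  have hmem : ∀ c, c < 6 → pvBest s = c → pvM s c = true := by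
    intro c hc he
    rcases best_attained s with h | ⟨p, hp, ⟨i, hpre⟩, hv⟩
    · omega
    · have hisin : PySem.Chars.isIn p.1 s = true :=
        (PySem.Chars.exists_prefix_drop_iff_isIn p.1 s).mp ⟨i, hpre⟩
      exact (m_iff s c hc).mpr ⟨p, hp, by omega, hisin⟩
  have hle : ∀ c, c < 6 → pvM s c = true → pvBest s ≤ c := by
    intro c hc hm
    obtain ⟨p, hp, hpc, hisin⟩ := (m_iff s c hc).mp hm
    exact hpc ▸ best_le_of_isIn s p hp hisin
  have hb6 : pvBest s ≤ 6 := by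
    rcases best_attained s with h | ⟨p, hp, _, hv⟩
    · omega
    · have := (pvKw_facts p hp).2; omega
  have hne : ∀ c, c < 6 → ¬ pvM s c = true → pvBest s ≠ c := by
    intro c hc hf he
    exact hf (hmem c hc he)
  split_ifs with h0 h1 h2 h3 h4 h5
  · have := hle 0 (by omega) h0; omega
  · have := hle 1 (by omega) h1; have := hne 0 (by omega) h0; omega
  · have := hle 2 (by omega) h2
    have := hne 0 (by omega) h0; have := hne 1 (by omega) h1; omega
  · have := hle 3 (by omega) h3
    have := hne 0 (by omega) h0; have := hne 1 (by omega) h1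
    have := hne 2 (by omega) h2; omega
  · have := hle 4 (by omega) h4
    have := hne 0 (by omega) h0; have := hne 1 (by omega) h1
    have := hne 2 (by omega) h2; have := hne 3 (by omega) h3; omega
  · have := hle 5 (by omega) h5
    have := hne 0 (by omega) h0; have := hne 1 (by omega) h1
    have := hne 2 (by omega) h2; have := hne 3 (by omega) h3
    have := hne 4 (by omega) h4; omega
  · have := hne 0 (by omega) h0; have := hne 1 (by omega) h1
    have := hne 2 (by omega) h2; have := hne 3 (by omega) h3
    have := hne 4 (by omega) h4; have := hne 5 (by omega) h5; omega

-- ===== VERDICT (by name: the statement is the Claim_ definition above) =====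
theorem categorize_title_spec : Claim_equal_categorize_title := by
  intro title _
  unfold Spec_categorize_title categorize_title categorize_title_alt
  cases title with
  | none => rfl
  | some t =>
    by_cases h : t = ""
    · simp [h]
    · simp only [h, if_false]
      have hb := best_eq (PySem.Str.lower t).toList
      unfold pvBest at hb
      rw [hb]
      simp only [pvM, pvGroups, PySem.Str.isIn_eq, List.any_cons, List.any_nil,
        List.getD, List.getElem?_cons_zero, List.getElem?_cons_succ, Option.getD_some]
      split_ifs <;> simp_all [pvLabels]
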